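-- pv_equiv track=rewrite | github.com/bcdunn7/Unit-18-Python-Data-Structures | 38_min_max_key_in_dictionary/min_max_key_in_dictionary.py | min_max_keys
-- ===== SOURCE A (Python) =====
-- def min_max_keys(d):
--     """Return tuple (min-keys, max-keys) in d.
--
--         >>> min_max_keys({2: 'a', 7: 'b', 1: 'c', 10: 'd', 4: 'e'})
--         (1, 10)
--
--     Works with any kind of key that can be compared, like strings:
--
--         >>> min_max_keys({"apple": "red", "cherry": "red", "berry": "blue"})
--         ('apple', 'cherry')
--     """
--
--     keys = list(d.keys())
--
--     min_k = keys[0]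
--     max_k = keys[0]
--
--     for key in keys:
--         if key < min_k:
--             min_k = key
--         if key > max_k:
--             max_k = key
--
--     return (min_k, max_k)
-- ===== SOURCE B (Python) =====
-- def min_max_keys(d):
--     """Return tuple (min-key, max-key) of d via sort-then-index."""
--     ks = sorted(d)
--     return (ks[0], ks[-1])
-- ===== Notes on version B (the rewrite author's own statement) =====
-- stated objective: alternative
-- what changed: Replaces A's single-pass running-min/max comparison loop with sorting the keys and taking the first and last element of the sorted list.
import Mathlib
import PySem

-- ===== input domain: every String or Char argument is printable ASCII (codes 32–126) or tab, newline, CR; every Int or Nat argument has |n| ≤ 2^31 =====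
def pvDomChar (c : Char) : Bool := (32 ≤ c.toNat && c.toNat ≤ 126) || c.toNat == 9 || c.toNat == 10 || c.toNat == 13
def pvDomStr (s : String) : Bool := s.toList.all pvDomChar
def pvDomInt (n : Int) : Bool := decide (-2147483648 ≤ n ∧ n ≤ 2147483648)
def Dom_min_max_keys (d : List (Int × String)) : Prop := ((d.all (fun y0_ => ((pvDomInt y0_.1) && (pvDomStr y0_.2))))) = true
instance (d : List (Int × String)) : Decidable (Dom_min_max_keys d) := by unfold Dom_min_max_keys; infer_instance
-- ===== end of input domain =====

-- B replaces A's one-pass running-min/max loop by sorting the keys and taking the sorted list's endpoints (alternative decomposition, not faster).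


-- ===== PORT A =====
-- keys = list(d.keys()); min_k = max_k = keys[0]; one pass updating both; return (min_k, max_k)
def min_max_keys (d : List (Int × String)) : Int × Int :=
  let keys := d.map (fun kv => kv.1)
  match PySem.List.pyGet? keys 0 with
  | none => (0, 0)   -- keys[0] raises IndexError on an empty dict; excluded by Pre_
  | some k0 =>
      keys.foldl (fun st key =>
        (if key < st.1 then key else st.1,
         if key > st.2 then key else st.2)) (k0, k0)

-- ===== PORT B =====
-- ks = sorted(d); return (ks[0], ks[-1])
def min_max_keys_alt (d : List (Int × String)) : Int × Int :=
  let ks := PySem.List.sorted (d.map (fun kv => kv.1)) (fun x => x) false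
  match PySem.List.pyGet? ks 0, PySem.List.pyGet? ks (-1) with
  | some lo, some hi => (lo, hi)
  | _, _ => (0, 0)   -- ks[0] raises IndexError on an empty dict; excluded by Pre_

-- ===== PRECONDITION & SPEC =====
-- Pre_ excludes only the empty dict, on which both A and B raise IndexError (keys[0] / ks[0]).
def Pre_min_max_keys (d : List (Int × String)) : Prop := d ≠ []
instance (d : List (Int × String)) : Decidable (Pre_min_max_keys d) := by unfold Pre_min_max_keys; infer_instance
def pvWitness_min_max_keys : (List (Int × String)) := [(2, "a"), (7, "b"), (1, "c")]
def Spec_min_max_keys (d : List (Int × String)) (out : Int × Int) : Prop := out = min_max_keys_alt d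
instance (d : List (Int × String)) (out : Int × Int) : Decidable (Spec_min_max_keys d out) := by unfold Spec_min_max_keys; infer_instance

-- ===== CLAIM (what is proved, stated in full; the proofs are below) =====
def Claim_equal_min_max_keys : Prop := ∀ (d : List (Int × String)), Dom_min_max_keys d → Pre_min_max_keys d → Spec_min_max_keys d (min_max_keys d)

-- ===== LEMMAS AND PROOFS =====

-- A's pair fold is componentwise (foldl min, foldl max).
lemma pairfold_eq (l : List Int) (a b : Int) :
    l.foldl (fun st key =>
        ((if key < st.1 then key else st.1 : Int),
         (if key > st.2 then key else st.2 : Int))) (a, b)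
      = (l.foldl min a, l.foldl max b) := by
  induction l generalizing a b with
  | nil => rfl
  | cons x xs ih =>
      have h1 : (if x < a then x else a) = min a x := by split <;> omega
      have h2 : (if x > b then x else b) = max b x := by split <;> omega
      simp only [List.foldl_cons, h1, h2, ih]

lemma foldl_min_le_init (l : List Int) : ∀ a : Int, l.foldl min a ≤ a := by
  induction l with
  | nil => simp
  | cons x xs ih =>
      intro a
      calc (x :: xs).foldl min a = xs.foldl min (min a x) := by simp [List.foldl_cons]
        _ ≤ min a x := ih _
        _ ≤ a := min_le_left _ _

lemma foldl_max_ge_init (l : List Int) : ∀ a : Int, a ≤ l.foldl max a := by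
  induction l with
  | nil => simp
  | cons x xs ih =>
      intro a
      calc a ≤ max a x := le_max_left _ _
        _ ≤ xs.foldl max (max a x) := ih _
        _ = (x :: xs).foldl max a := by simp [List.foldl_cons]

lemma fmin_spec (l : List Int) (a : Int) :
    (l.foldl min a = a ∨ l.foldl min a ∈ l) ∧ ∀ y ∈ l, l.foldl min a ≤ y := by
  induction l generalizing a with
  | nil => simp
  | cons x xs ih =>
      obtain ⟨hmem, hle⟩ := ih (min a x)
      simp only [List.foldl_cons]
      refine ⟨?_, ?_⟩
      · rcases hmem with h | h
        · rcases min_choice a x with hc | hc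
          · left; rw [h, hc]
          · right; rw [h, hc]; exact List.mem_cons_self ..
        · right; exact List.mem_cons_of_mem _ h
      · intro y hy
        rcases List.mem_cons.mp hy with rfl | hy
        · calc xs.foldl min (min a y) ≤ min a y := foldl_min_le_init _ _
            _ ≤ y := min_le_right _ _
        · exact hle y hy

lemma fmax_spec (l : List Int) (a : Int) :
    (l.foldl max a = a ∨ l.foldl max a ∈ l) ∧ ∀ y ∈ l, y ≤ l.foldl max a := by
  induction l generalizing a with
  | nil => simp
  | cons x xs ih =>
      obtain ⟨hmem, hle⟩ := ih (max a x)
      simp only [List.foldl_cons]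
      refine ⟨?_, ?_⟩
      · rcases hmem with h | h
        · rcases max_choice a x with hc | hc
          · left; rw [h, hc]
          · right; rw [h, hc]; exact List.mem_cons_self ..
        · right; exact List.mem_cons_of_mem _ h
      · intro y hy
        rcases List.mem_cons.mp hy with rfl | hy
        · calc y ≤ max a y := le_max_right _ _
            _ ≤ xs.foldl max (max a y) := foldl_max_ge_init _ _
        · exact hle y hy

-- everything in a (≤)-pairwise list is ≤ its last element
lemma le_getLast_of_pairwise (l : List Int) (h : l.Pairwise (· ≤ ·)) (hl : l ≠ []) :
    ∀ y ∈ l, y ≤ l.getLast hl := by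
  induction l with
  | nil => simp
  | cons x xs ih =>
      intro y hy
      cases xs with
      | nil => simp at hy; simp [hy, List.getLast]
      | cons z zs =>
          have h' := List.pairwise_cons.mp h
          rcases List.mem_cons.mp hy with rfl | hy
          · have : y ≤ (z :: zs).getLast (by simp) :=
              h'.1 _ (List.getLast_mem _)
            simpa [List.getLast_cons] using this
          · have := ih h'.2 (by simp) y hy
            simpa [List.getLast_cons] using this

-- ===== VERDICT (by name: the statement is the Claim_ definition above) =====
theorem min_max_keys_spec : Claim_equal_min_max_keys := by
  intro d _ hne
  unfold Spec_min_max_keys min_max_keys min_max_keys_alt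
  set keys := d.map (fun kv => kv.1) with hkeys
  have hkne : keys ≠ [] := by
    cases d with
    | nil => exact absurd rfl hne
    | cons p ps => simp [hkeys]
  obtain ⟨k0, rest, hk⟩ := List.exists_cons_of_ne_nil hkne
  set ks := PySem.List.sorted keys (fun x => x) false with hks
  have hksne : ks ≠ [] := by
    intro h0
    exact hkne ((PySem.List.sorted_eq_nil_iff _ _ _).mp h0)
  obtain ⟨m, t, hms⟩ := List.exists_cons_of_ne_nil hksne
  -- evaluate the index accesses
  have hget0A : PySem.List.pyGet? keys 0 = some k0 := by
    rw [hk]; exact PySem.List.pyGet?_zero_cons _ _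
  have hget0B : PySem.List.pyGet? ks 0 = some m := by
    rw [hms]; exact PySem.List.pyGet?_zero_cons _ _
  have hlast : PySem.List.pyGet? ks (-1) = some (ks.getLast hksne) := by
    rw [PySem.List.pyGet?_neg_one, List.getLast?_eq_getLast_of_ne_nil hksne]
  simp only [hget0A, hget0B, hlast, pairfold_eq]
  -- properties of sorted endpoints
  have hmmem : m ∈ keys := (PySem.List.mem_sorted _ _ _ _).mp (by rw [← hks, hms]; simp)
  have hmin : ∀ y ∈ keys, m ≤ y := by
    intro y hy
    have := PySem.List.key_head_sorted_le (xs := keys) (key := fun x => x)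
      (m := m) (t := t) (by rw [← hks, hms]) y hy
    simpa using this
  have hlmem : ks.getLast hksne ∈ keys := (PySem.List.mem_sorted _ _ _ _).mp (List.getLast_mem _)
  have hmax : ∀ y ∈ keys, y ≤ ks.getLast hksne := by
    intro y hy
    have hpw : ks.Pairwise (· ≤ ·) := by
      have := PySem.List.sorted_pairwise (xs := keys) (key := fun x => x)
      simpa [hks] using this
    exact le_getLast_of_pairwise ks hpw hksne y ((PySem.List.mem_sorted _ _ _ _).mpr hy)
  -- antisymmetry
  obtain ⟨hminmem, hminle⟩ := fmin_spec keys k0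
  obtain ⟨hmaxmem, hmaxge⟩ := fmax_spec keys k0
  have hk0mem : k0 ∈ keys := by rw [hk]; simp
  have hminmem' : keys.foldl min k0 ∈ keys := by
    rcases hminmem with h | h
    · rw [h]; exact hk0mem
    · exact h
  have hmaxmem' : keys.foldl max k0 ∈ keys := by
    rcases hmaxmem with h | h
    · rw [h]; exact hk0mem
    · exact h
  simp only [Prod.mk.injEq]
  exact ⟨le_antisymm (hminle m hmmem) (hmin _ hminmem'),
         le_antisymm (hmax _ hmaxmem') (hmaxge _ hlmem)⟩
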